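-- pv_equiv track=rewrite | github.com/MysteryManav/StriversPractice | S9/L3/P3.py | nextSmallestElement
-- ===== SOURCE A (Python) =====
-- def nextSmallestElement(arr):
--     n = len(arr)
--     stack = []
--     res = [-1] * n
--     for i in range(2*n-1, -1, -1):
--         while stack and stack[-1] >= arr[i%n]:
--             stack.pop()
--         if i < n:
--             if stack:
--                 res[i] = stack[-1]
--         stack.append(arr[i%n])
--     return res
-- ===== SOURCE B (Python) =====
-- def nextSmallestElement(arr):
--     n = len(arr)
--     res = []
--     for i in range(n):
--         val = -1
--         for j in range(1, n):
--             c = arr[(i + j) % n]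
--             if c < arr[i]:
--                 val = c
--                 break
--         res.append(val)
--     return res
-- ===== Notes on version B (the rewrite author's own statement) =====
-- stated objective: simpler
-- what changed: Replaced the doubled-range monotonic-stack pass with a direct per-index circular forward scan that takes the first strictly smaller element among the next n-1 positions.
import Mathlib
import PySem

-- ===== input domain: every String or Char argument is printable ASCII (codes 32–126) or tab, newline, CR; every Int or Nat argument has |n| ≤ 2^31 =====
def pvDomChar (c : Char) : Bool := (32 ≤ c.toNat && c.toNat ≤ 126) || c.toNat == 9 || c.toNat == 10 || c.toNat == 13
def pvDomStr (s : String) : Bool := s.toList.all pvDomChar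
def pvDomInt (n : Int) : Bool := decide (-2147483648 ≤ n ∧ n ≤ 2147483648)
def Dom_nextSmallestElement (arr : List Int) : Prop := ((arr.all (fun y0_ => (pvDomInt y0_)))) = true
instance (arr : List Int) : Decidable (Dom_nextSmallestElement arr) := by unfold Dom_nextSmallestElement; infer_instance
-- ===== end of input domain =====

-- B replaces A's doubled-range monotonic stack by a direct per-index circular forward scan (simpler, not faster).

-- ===== PORT A =====
-- the stack is stored TOP-FIRST (Python's stack[-1] = head, append = cons, pop = tail)
def nseStep (arr : List Int) (n : Int) (st : List Int × List Int) (i : Int) : List Int × List Int :=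
  let c := PySem.List.pyGetD arr (PySem.Int.mod i n) 0    -- arr[i % n]
  let stack := st.1.dropWhile (fun t => decide (c ≤ t))   -- while stack and stack[-1] >= arr[i%n]: stack.pop()
  let res := if i < n then
      (match stack with
       | t :: _ => PySem.List.pySetD st.2 i t             -- if stack: res[i] = stack[-1]
       | [] => st.2)
    else st.2
  (c :: stack, res)                                       -- stack.append(arr[i%n])

def nextSmallestElement (arr : List Int) : List Int :=
  let n : Int := arr.length
  ((PySem.List.pyRange (2*n - 1) (-1) (-1)).foldl (nseStep arr n)
    ([], List.replicate arr.length (-1))).2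

-- ===== PORT B =====
-- inner 'for j in range(1, n): … break' loop, ported as recursion over the list of j's
def nseScan (arr : List Int) (vi : Int) (i n : Nat) : List Nat → Int
  | [] => -1
  | j :: rest =>
    let c := arr.getD ((i + j) % n) 0
    if c < vi then c else nseScan arr vi i n rest

def nextSmallestElement_alt (arr : List Int) : List Int :=
  let n := arr.length
  (List.range n).map (fun i => nseScan arr (arr.getD i 0) i n (List.range' 1 (n-1)))

-- ===== PRECONDITION & SPEC =====
def Spec_nextSmallestElement (arr : List Int) (out : List Int) : Prop := out = nextSmallestElement_alt arr
instance (arr : List Int) (out : List Int) : Decidable (Spec_nextSmallestElement arr out) := by unfold Spec_nextSmallestElement; infer_instance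

-- ===== CLAIM (what is proved, stated in full; the proofs are below) =====
def Claim_equal_nextSmallestElement : Prop := ∀ (arr : List Int), Dom_nextSmallestElement arr → Spec_nextSmallestElement arr (nextSmallestElement arr)

-- ===== LEMMAS AND PROOFS =====

-- value at circular position k
def nseV (arr : List Int) (k : Nat) : Int := arr.getD (k % arr.length) 0

-- the monotonic stack built by processing a list of values from last to first (head = top)
def nseBuild : List Int → List Int
  | [] => []
  | x :: l => x :: (nseBuild l).dropWhile (fun t => decide (x ≤ t))

-- values at positions j, j+1, …, 2n-1
def nseVals (arr : List Int) (j : Nat) : List Int :=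
  (List.range' j (2*arr.length - j)).map (nseV arr)

-- A's result at index i
def nseSpec (arr : List Int) (i : Nat) : Int :=
  (((nseVals arr (i+1)).find? (fun x => decide (x < nseV arr i)))).getD (-1)

-- the res array after all indices ≥ j have been processed
def nseResAt (arr : List Int) (j : Nat) : List Int :=
  (List.range arr.length).map (fun i => if j ≤ i then nseSpec arr i else -1)

theorem nse_dropWhile_dropWhile {p q : Int → Bool} (h : ∀ a, q a = true → p a = true) :
    ∀ l : List Int, (l.dropWhile q).dropWhile p = l.dropWhile p := by
  intro l
  induction l with
  | nil => rfl
  | cons a l ih =>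
    by_cases hq : q a = true
    · rw [List.dropWhile_cons_of_pos hq, ih, List.dropWhile_cons_of_pos (h a hq)]
    · rw [List.dropWhile_cons_of_neg (by simp_all)]

theorem nse_build_head? (w : Int) :
    ∀ L : List Int, ((nseBuild L).dropWhile (fun t => decide (w ≤ t))).head?
      = L.find? (fun x => decide (x < w)) := by
  intro L
  induction L with
  | nil => rfl
  | cons x l ih =>
    by_cases hx : x < w
    · rw [nseBuild, List.dropWhile_cons_of_neg (by simp [not_le.mpr hx]),
        List.find?_cons_of_pos (by simp [hx])]
      rfl
    · rw [nseBuild, List.dropWhile_cons_of_pos (by simp [not_lt.mp hx]),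
        nse_dropWhile_dropWhile (by intro a ha; simp at ha ⊢; omega),
        List.find?_cons_of_neg (by simp [hx]), ih]

theorem nse_vals_cons (arr : List Int) (j : Nat) (hj : j < 2*arr.length) :
    nseVals arr j = nseV arr j :: nseVals arr (j+1) := by
  unfold nseVals
  rw [show 2*arr.length - j = (2*arr.length - (j+1)) + 1 by omega, List.range'_succ]
  rfl

theorem nse_step_eq (arr : List Int) (j : Nat) (hj : j < 2*arr.length) :
    nseStep arr (arr.length : Int) (nseBuild (nseVals arr (j+1)), nseResAt arr (j+1)) (j : Int)
      = (nseBuild (nseVals arr j), nseResAt arr j) := by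
  have hn : 0 < arr.length := by omega
  unfold nseStep
  have hc : PySem.List.pyGetD arr (PySem.Int.mod (j : Int) (arr.length : Int)) 0 = nseV arr j := by
    rw [PySem.Int.mod_natCast, PySem.List.pyGetD_natCast]; rfl
  simp only [hc]
  refine Prod.ext_iff.mpr ⟨?_, ?_⟩
  · -- stack component
    rw [nse_vals_cons arr j hj, nseBuild]
  · -- res component
    by_cases hjn : j < arr.length
    · rw [if_pos (by exact_mod_cast hjn)]
      have hhead := nse_build_head? (nseV arr j) (nseVals arr (j+1))
      cases hfind : (nseVals arr (j+1)).find? (fun x => decide (x < nseV arr j)) with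
      | none =>
        rw [hfind] at hhead
        rw [List.head?_eq_none_iff.mp hhead]
        apply List.ext_getElem (by simp [nseResAt])
        intro k h1 h2
        simp only [nseResAt, List.getElem_map, List.getElem_range]
        by_cases hkj : k = j
        · subst hkj
          rw [if_neg (by omega), if_pos (le_refl _)]
          simp [nseSpec, hfind]
        · by_cases h3 : j ≤ k
          · rw [if_pos (by omega), if_pos h3]
          · rw [if_neg (by omega), if_neg h3]
      | some t =>
        rw [hfind] at hhead
        obtain ⟨rest, hrest⟩ := List.head?_eq_some_iff.mp hhead
        rw [hrest]
        simp only [PySem.List.pySetD_natCast]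
        apply List.ext_getElem (by simp [nseResAt])
        intro k h1 h2
        rw [List.getElem_set]
        simp only [nseResAt, List.getElem_map, List.getElem_range]
        by_cases hkj : j = k
        · subst hkj
          rw [if_pos rfl, if_pos (le_refl _)]
          simp [nseSpec, hfind]
        · rw [if_neg hkj]
          by_cases h3 : j ≤ k
          · rw [if_pos (by omega), if_pos h3]
          · rw [if_neg (by omega), if_neg h3]
    · rw [if_neg (by exact_mod_cast hjn)]
      have hres : nseResAt arr (j+1) = nseResAt arr j := by
        apply List.map_congr_left
        intro i hi
        simp only [List.mem_range] at hi
        rw [if_neg (by omega), if_neg (by omega)]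
      cases (nseBuild (nseVals arr (j+1))).dropWhile (fun t => decide (nseV arr j ≤ t)) <;>
        simpa using hres

theorem nse_fold_inv (arr : List Int) :
    ∀ j : Nat, j ≤ 2*arr.length →
    (PySem.List.pyRange ((j : Int) - 1) (-1) (-1)).foldl (nseStep arr (arr.length : Int))
        (nseBuild (nseVals arr j), nseResAt arr j)
      = (nseBuild (nseVals arr 0), nseResAt arr 0) := by
  intro j
  induction j with
  | zero =>
    intro _
    rw [PySem.List.pyRange_neg_one_eq_nil (by norm_num)]
    rfl
  | succ j ih =>
    intro hj
    have h1 : ((j+1 : Nat) : Int) - 1 = (j : Int) := by push_cast; ring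
    rw [h1, PySem.List.pyRange_neg_one_cons (by omega), List.foldl_cons,
      nse_step_eq arr j (by omega)]
    exact ih (by omega)

theorem nse_A_eq (arr : List Int) : nextSmallestElement arr = nseResAt arr 0 := by
  unfold nextSmallestElement
  have h1 : 2*(arr.length : Int) - 1 = ((2*arr.length : Nat) : Int) - 1 := by push_cast; ring
  have h2 : nseVals arr (2*arr.length) = [] := by
    unfold nseVals
    rw [show 2*arr.length - 2*arr.length = 0 by omega]
    rfl
  have h3 : nseResAt arr (2*arr.length) = List.replicate arr.length (-1) := by
    apply List.ext_getElem (by simp [nseResAt])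
    intro k hk1 hk2
    simp only [nseResAt, List.getElem_map, List.getElem_range, List.getElem_replicate] at *
    rw [if_neg (by simp [nseResAt] at hk1; omega)]
  have := nse_fold_inv arr (2*arr.length) (le_refl _)
  rw [h2] at this
  rw [show nseBuild [] = ([] : List Int) from rfl] at this
  simp only [h1]
  rw [← h3]
  rw [this]

theorem nse_scan_eq (arr : List Int) (w : Int) (i n : Nat) :
    ∀ js : List Nat, nseScan arr w i n js
      = ((js.map (fun j => arr.getD ((i+j) % n) 0)).find? (fun c => decide (c < w))).getD (-1) := by
  intro js
  induction js with
  | nil => rfl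
  | cons j rest ih =>
    by_cases h : arr.getD ((i+j) % n) 0 < w
    · rw [nseScan, if_pos h, List.map_cons, List.find?_cons_of_pos (by simpa using h)]
      rfl
    · rw [nseScan, if_neg h, List.map_cons, List.find?_cons_of_neg (by simpa using h), ih]

theorem nse_range'_split (s m k : Nat) (h : m ≤ k) :
    List.range' s k = List.range' s m ++ List.range' (s+m) (k-m) := by
  conv_lhs => rw [show k = m + (k-m) by omega]
  rw [← List.range'_append]
  simp

-- the window lemma: A's scan over positions i+1 … 2n-1 finds the same first smaller value
-- as B's scan over the n-1 positions i+1 … i+n-1, because the extra positions repeat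
-- already-scanned values (or arr[i] itself)
theorem nse_window (arr : List Int) (i : Nat) (hi : i < arr.length) :
    nseSpec arr i
      = (((List.range' (i+1) (arr.length-1)).map (nseV arr)).find?
          (fun x => decide (x < nseV arr i))).getD (-1) := by
  have hsplit : nseVals arr (i+1)
      = (List.range' (i+1) (arr.length-1)).map (nseV arr)
        ++ (List.range' (i+arr.length) (arr.length-i)).map (nseV arr) := by
    unfold nseVals
    rw [nse_range'_split (i+1) (arr.length-1) _ (by omega),
      show i+1+(arr.length-1) = i+arr.length by omega,
      show 2*arr.length-(i+1)-(arr.length-1) = arr.length-i by omega, List.map_append]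
  unfold nseSpec
  rw [hsplit, List.find?_append]
  cases hfind : ((List.range' (i+1) (arr.length-1)).map (nseV arr)).find?
      (fun x => decide (x < nseV arr i)) with
  | some t => rfl
  | none =>
    have hnone : (((List.range' (i+arr.length) (arr.length-i)).map (nseV arr)).find?
        (fun x => decide (x < nseV arr i))) = none := by
      rw [List.find?_eq_none]
      intro x hx
      obtain ⟨k, hk, rfl⟩ := List.mem_map.mp hx
      have hk' := List.mem_range'_1.mp hk
      by_cases hkeq : k = i + arr.length
      · subst hkeq
        have : nseV arr (i+arr.length) = nseV arr i := by
          unfold nseV; rw [Nat.add_mod_right]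
        rw [this]; simp
      · have hmem : nseV arr k ∈ (List.range' (i+1) (arr.length-1)).map (nseV arr) := by
          have hkn : nseV arr k = nseV arr (k - arr.length) := by
            unfold nseV
            rw [Nat.mod_eq_sub_mod (by omega)]
          rw [hkn]
          exact List.mem_map.mpr ⟨k - arr.length,
            List.mem_range'_1.mpr ⟨by omega, by omega⟩, rfl⟩
        have := List.find?_eq_none.mp hfind _ hmem
        simpa using this
    rw [hnone]; rfl

theorem nse_B_eq (arr : List Int) : nextSmallestElement_alt arr = nseResAt arr 0 := by
  unfold nextSmallestElement_alt nseResAt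
  apply List.map_congr_left
  intro i hi
  simp only [List.mem_range] at hi
  rw [nse_scan_eq, if_pos (Nat.zero_le i)]
  have hmap : (List.range' 1 (arr.length-1)).map (fun j => arr.getD ((i+j) % arr.length) 0)
      = (List.range' (i+1) (arr.length-1)).map (nseV arr) := by
    rw [show i+1 = i+1 by rfl, ← List.map_add_range', List.map_map]
    exact List.map_congr_left (fun j _ => rfl)
  have hvi : arr.getD i 0 = nseV arr i := by
    unfold nseV; rw [Nat.mod_eq_of_lt hi]
  rw [hvi, hmap, nse_window arr i hi]

-- ===== VERDICT (by name: the statement is the Claim_ definition above) =====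
theorem nextSmallestElement_spec : Claim_equal_nextSmallestElement := by
  intro arr _
  unfold Spec_nextSmallestElement
  rw [nse_A_eq, nse_B_eq]
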